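-- pv_equiv track=rewrite | github.com/NitinMoturu72/HackerRank-Python | largestSubarrywithMinFrequency.py | findConsistentLogs
-- ===== SOURCE A (Python) =====
-- from collections import Counter, defaultdict
--
-- def findConsistentLogs(userEvent):
--     n = len(userEvent)
--
--     # Calculate the minimum frequency in the entire array
--     total_count = Counter(userEvent)
--     min_frequency = min(total_count.values())
--
--     # Variables to keep track of the sliding window
--     left = 0
--     max_len = 0
--     current_count = defaultdict(int)
--
--     for right in range(n):
--         current_count[userEvent[right]] += 1
--
--         # While the max frequency in the current window is greater than min_frequency, move the left pointer
--         while max(current_count.values()) > min_frequency: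
--             current_count[userEvent[left]] -= 1
--             if current_count[userEvent[left]] == 0:
--                 del current_count[userEvent[left]]
--             left += 1
--
--         # Check if the current window is valid
--         if max(current_count.values()) == min_frequency:
--             max_len = max(max_len, right - left + 1)
--
--     return max_len
-- ===== SOURCE B (Python) =====
-- from collections import Counter
--
-- def findConsistentLogs(userEvent):
--     m = min(Counter(userEvent).values())
--     cnt = {}
--     at_m = 0      # number of distinct values whose window count is exactly m
--     left = 0
--     best = 0
--     for right, x in enumerate(userEvent):
--         c = cnt.get(x, 0) + 1
--         cnt[x] = c
--         if c == m:
--             at_m += 1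
--         elif c > m:
--             at_m -= 1            # x's count just left m (it is now m + 1)
--             while cnt[x] > m:    # only x can exceed m; shrink until it drops back
--                 y = userEvent[left]
--                 d = cnt[y] - 1
--                 cnt[y] = d
--                 left += 1
--                 if d == m:
--                     at_m += 1
--                 elif d == m - 1:
--                     at_m -= 1
--         if at_m > 0 and right - left + 1 > best:
--             best = right - left + 1
--     return best
-- ===== Notes on version B (the rewrite author's own statement) =====
-- stated objective: faster
-- what changed: A rescans the whole frequency dict with max(current_count.values()) at every window move (O(n*d)); B maintains the window max implicitly by keeping an incremental count of distinct values whose window frequency equals the global minimum frequency, so each element is processed in O(1) and no inner scan remains.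
import Mathlib
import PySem

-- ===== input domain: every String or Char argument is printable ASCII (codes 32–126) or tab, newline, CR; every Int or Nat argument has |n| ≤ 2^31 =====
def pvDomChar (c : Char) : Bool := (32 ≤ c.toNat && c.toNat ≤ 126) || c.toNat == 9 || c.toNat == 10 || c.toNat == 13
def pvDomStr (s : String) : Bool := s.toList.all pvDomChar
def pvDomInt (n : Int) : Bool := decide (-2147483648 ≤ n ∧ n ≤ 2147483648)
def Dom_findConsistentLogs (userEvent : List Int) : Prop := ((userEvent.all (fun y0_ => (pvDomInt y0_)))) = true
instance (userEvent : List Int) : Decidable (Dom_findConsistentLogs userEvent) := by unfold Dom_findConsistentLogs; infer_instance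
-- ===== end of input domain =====

-- B replaces A's rescan of the whole frequency dict (max(current_count.values()) at every
-- window move) by an incrementally maintained count of distinct values whose window
-- frequency equals the global minimum frequency; objective: faster.

-- ===== PORT A =====
-- A's 'while max(current_count.values()) > min_frequency' loop; the fuel argument only
-- makes the recursion structural (n+1 is always enough: each pass moves left up by 1)
def pvAshrink (ev : List Int) (m : Int) : Nat → PySem.Dict Int Int → Int → PySem.Dict Int Int × Int
  | 0, d, left => (d, left)
  | fuel+1, d, left =>
    match PySem.List.max? d.values (fun v => v) with
    | none => (d, left)   -- Python's max() would raise here; unreachable under Pre_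
    | some mx =>
      if m < mx then
        let y := PySem.List.pyGetD ev left 0
        let d1 := PySem.Dict.modify d y 0 (fun c => c - 1)
        let d2 := if PySem.Dict.getD d1 y 0 = 0 then PySem.Dict.erase d1 y else d1
        pvAshrink ev m fuel d2 (left + 1)
      else (d, left)

-- one iteration of A's 'for right in range(n)' loop; state = (current_count, left, max_len)
def pvAstep (ev : List Int) (m : Int) (n : Nat)
    (st : PySem.Dict Int Int × Int × Int) (right : Int) : PySem.Dict Int Int × Int × Int :=
  let d0 := PySem.Dict.modify st.1 (PySem.List.pyGetD ev right 0) 0 (fun c => c + 1)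
  let p := pvAshrink ev m (n + 1) d0 st.2.1
  let maxLen :=
    match PySem.List.max? p.1.values (fun v => v) with
    | none => st.2.2   -- Python's max() would raise here; unreachable under Pre_
    | some mx => if mx = m then max st.2.2 (right - p.2 + 1) else st.2.2
  (p.1, p.2, maxLen)

def findConsistentLogs (userEvent : List Int) : Int :=
  let n := userEvent.length
  match PySem.List.min? (PySem.Dict.counter userEvent).values (fun v => v) with
  | none => 0   -- min() of an empty Counter raises ValueError; excluded by Pre_
  | some m =>
    ((PySem.List.pyRange 0 (n : Int)).foldl (pvAstep userEvent m n) (PySem.Dict.empty, 0, 0)).2.2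

-- ===== PORT B =====
-- B's 'while cnt[x] > m' loop; state = (cnt, at_m, left); fuel as above
def pvBshrink (ev : List Int) (m : Int) (x : Int) :
    Nat → PySem.Dict Int Int → Int → Int → PySem.Dict Int Int × Int × Int
  | 0, cnt, atm, left => (cnt, atm, left)
  | fuel+1, cnt, atm, left =>
    if m < PySem.Dict.getD cnt x 0 then
      let y := PySem.List.pyGetD ev left 0
      let dv := PySem.Dict.getD cnt y 0 - 1
      let cnt' := PySem.Dict.insert cnt y dv
      let atm' := if dv = m then atm + 1 else if dv = m - 1 then atm - 1 else atm
      pvBshrink ev m x fuel cnt' atm' (left + 1)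
    else (cnt, atm, left)

-- one iteration of B's 'for right, x in enumerate(userEvent)'; state = (cnt, at_m, left, best)
def pvBstep (ev : List Int) (m : Int) (n : Nat)
    (st : PySem.Dict Int Int × Int × Int × Int) (p : Int × Int) :
    PySem.Dict Int Int × Int × Int × Int :=
  let c := PySem.Dict.getD st.1 p.2 0 + 1
  let cnt := PySem.Dict.insert st.1 p.2 c
  let q :=
    if c = m then (cnt, st.2.1 + 1, st.2.2.1)
    else if m < c then pvBshrink ev m p.2 (n + 1) cnt (st.2.1 - 1) st.2.2.1
    else (cnt, st.2.1, st.2.2.1)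
  let best := if 0 < q.2.1 ∧ st.2.2.2 < p.1 - q.2.2 + 1 then p.1 - q.2.2 + 1 else st.2.2.2
  (q.1, q.2.1, q.2.2, best)

def findConsistentLogs_alt (userEvent : List Int) : Int :=
  match PySem.List.min? (PySem.Dict.counter userEvent).values (fun v => v) with
  | none => 0   -- min() of an empty Counter raises ValueError; excluded by Pre_
  | some m =>
    ((PySem.List.enumerate userEvent).foldl (pvBstep userEvent m userEvent.length)
      (PySem.Dict.empty, 0, 0, 0)).2.2.2

-- ===== PRECONDITION & SPEC =====
-- Pre_ excludes only the empty list, on which both A and B raise ValueError (min() of no values).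
def Pre_findConsistentLogs (userEvent : List Int) : Prop := userEvent ≠ []
instance (userEvent : List Int) : Decidable (Pre_findConsistentLogs userEvent) := by
  unfold Pre_findConsistentLogs; infer_instance
def pvWitness_findConsistentLogs : List Int := [1, 2, 1]

def Spec_findConsistentLogs (userEvent : List Int) (out : Int) : Prop := out = findConsistentLogs_alt userEvent
instance (userEvent : List Int) (out : Int) : Decidable (Spec_findConsistentLogs userEvent out) := by unfold Spec_findConsistentLogs; infer_instance

-- ===== CLAIM (what is proved, stated in full; the proofs are below) =====
def Claim_equal_findConsistentLogs : Prop := ∀ (userEvent : List Int), Dom_findConsistentLogs userEvent → Pre_findConsistentLogs userEvent → Spec_findConsistentLogs userEvent (findConsistentLogs userEvent)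

-- ===== LEMMAS AND PROOFS =====

-- invariant of A's dict over the current window w: nodup keys, getD = window count, keys = support of w
def pvInvA (d : PySem.Dict Int Int) (w : List Int) : Prop :=
  d.keys.Nodup ∧ (∀ v : Int, PySem.Dict.getD d v 0 = (w.count v : Int)) ∧
  (∀ v : Int, v ∈ d.keys ↔ v ∈ w)

-- B's cnt may keep zero entries; only lookups matter
def pvInvB (c : PySem.Dict Int Int) (w : List Int) : Prop :=
  ∀ v : Int, PySem.Dict.getD c v 0 = (w.count v : Int)

-- number of distinct values of w whose count in w is exactly m
def pvAtm (m : Int) (w : List Int) : Int :=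
  (w.dedup.countP (fun v => (w.count v : Int) == m) : Int)

-- relation between A's and B's loop states after processing the first k elements
def pvRel (ev : List Int) (m : Int) (k : Nat)
    (sA : PySem.Dict Int Int × Int × Int) (sB : PySem.Dict Int Int × Int × Int × Int) : Prop :=
  ∃ l : Nat, l ≤ k ∧
    sA.2.1 = (l : Int) ∧ sB.2.2.1 = (l : Int) ∧ sA.2.2 = sB.2.2.2 ∧
    pvInvA sA.1 ((ev.take k).drop l) ∧ pvInvB sB.1 ((ev.take k).drop l) ∧
    sB.2.1 = pvAtm m ((ev.take k).drop l) ∧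
    (∀ v : Int, ((((ev.take k).drop l).count v : Int) ≤ m))

theorem pvCountP_point (s : List Int) (hs : s.Nodup) (x : Int) (hx : x ∈ s) (p q : Int → Bool)
    (h : ∀ v ∈ s, v ≠ x → p v = q v) :
    (s.countP q : Int) =
      (s.countP p : Int) + ((if q x then 1 else 0) - (if p x then 1 else 0)) := by
  have hperm := List.perm_cons_erase hx
  have h1 : s.countP q = List.countP q (s.erase x) + (if q x then 1 else 0) := by
    rw [hperm.countP_eq, List.countP_cons]
  have h1p : s.countP p = List.countP p (s.erase x) + (if p x then 1 else 0) := by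
    rw [hperm.countP_eq, List.countP_cons]
  have h2 : List.countP p (s.erase x) = List.countP q (s.erase x) :=
    List.countP_congr (fun v hv => by
      have hv' := hs.mem_erase_iff.1 hv
      rw [h v hv'.2 hv'.1])
  cases hq : q x <;> cases hp : p x <;> simp [hq, hp] at h1 h1p ⊢ <;> omega

theorem pvCountP_same (s s' : List Int) (hs : s.Nodup) (hs' : s'.Nodup)
    (hmem : ∀ v, v ∈ s ↔ v ∈ s') (p : Int → Bool) : s.countP p = s'.countP p :=
  List.Perm.countP_eq p ((List.perm_ext_iff_of_nodup hs hs').2 hmem)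

theorem pvAtm_append (m : Int) (hm : m ≠ 0) (w : List Int) (x : Int) :
    pvAtm m (w ++ [x]) =
      pvAtm m w + ((if (w.count x : Int) + 1 = m then 1 else 0) -
                   (if (w.count x : Int) = m then 1 else 0)) := by
  unfold pvAtm
  have hcnt : ∀ v : Int, v ≠ x → (w ++ [x]).count v = w.count v := by
    intro v hv
    simp [List.count_append, List.count_singleton']
    exact fun h => hv h.symm
  have hcx : (w ++ [x]).count x = w.count x + 1 := by
    simp [List.count_append]
  by_cases hxw : x ∈ w
  · have hmem : ∀ v, v ∈ (w ++ [x]).dedup ↔ v ∈ w.dedup := by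
      intro v
      simp only [List.mem_dedup, List.mem_append, List.mem_singleton]
      constructor
      · rintro (h | h)
        · exact h
        · exact h ▸ hxw
      · exact Or.inl
    have e1 : List.countP (fun v => (((w ++ [x]).count v : Int) == m)) ((w ++ [x]).dedup)
        = List.countP (fun v => (((w ++ [x]).count v : Int) == m)) w.dedup :=
      pvCountP_same _ _ (List.nodup_dedup _) (List.nodup_dedup _) hmem _
    have e2 := pvCountP_point w.dedup (List.nodup_dedup w) x (List.mem_dedup.2 hxw)
        (fun v => ((w.count v : Int) == m)) (fun v => (((w ++ [x]).count v : Int) == m))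
        (fun v _ hv => by simp only [hcnt v hv])
    rw [e1, e2]
    simp only [hcx, beq_iff_eq]
    push_cast
    omega
  · have hxd : x ∉ w.dedup := fun h => hxw (List.mem_dedup.1 h)
    have hmem : ∀ v, v ∈ (w ++ [x]).dedup ↔ v ∈ w.dedup ++ [x] := by
      intro v
      simp [List.mem_dedup, List.mem_append]
    have e1 : List.countP (fun v => (((w ++ [x]).count v : Int) == m)) ((w ++ [x]).dedup)
        = List.countP (fun v => (((w ++ [x]).count v : Int) == m)) (w.dedup ++ [x]) :=
      pvCountP_same _ _ (List.nodup_dedup _)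
        (List.Nodup.append (List.nodup_dedup _) (List.nodup_singleton _)
          (by intro a ha hb; simp at hb; exact hxd (hb ▸ ha))) hmem _
    have e2 : List.countP (fun v => (((w ++ [x]).count v : Int) == m)) w.dedup
        = List.countP (fun v => ((w.count v : Int) == m)) w.dedup :=
      List.countP_congr (fun v hv => by
        have : v ≠ x := fun hvx => hxd (hvx ▸ hv)
        simp only [hcnt v this])
    have hc0 : w.count x = 0 := List.count_eq_zero.2 hxw
    rw [e1, List.countP_append, e2]
    simp only [List.countP_cons, List.countP_nil, hcx, hc0, beq_iff_eq]
    push_cast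
    split_ifs <;> omega

theorem pvAtm_cons (m : Int) (hm : m ≠ 0) (y : Int) (t : List Int) :
    pvAtm m t =
      pvAtm m (y :: t) + ((if (t.count y : Int) = m then 1 else 0) -
                          (if (t.count y : Int) + 1 = m then 1 else 0)) := by
  unfold pvAtm
  have hcnt : ∀ v : Int, v ≠ y → (y :: t).count v = t.count v := by
    intro v hv
    rw [List.count_cons]
    simp only [beq_iff_eq]
    rw [if_neg (fun h : y = v => hv h.symm), Nat.add_zero]
  have hcy : (y :: t).count y = t.count y + 1 := by simp
  by_cases hyt : y ∈ t
  · have hmem : ∀ v, v ∈ (y :: t).dedup ↔ v ∈ t.dedup := by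
      intro v
      simp only [List.mem_dedup, List.mem_cons]
      constructor
      · rintro (h | h)
        · exact h ▸ hyt
        · exact h
      · exact Or.inr
    have e1 : List.countP (fun v => (((y :: t).count v : Int) == m)) ((y :: t).dedup)
        = List.countP (fun v => (((y :: t).count v : Int) == m)) t.dedup :=
      pvCountP_same _ _ (List.nodup_dedup _) (List.nodup_dedup _) hmem _
    have e2 := pvCountP_point t.dedup (List.nodup_dedup t) y (List.mem_dedup.2 hyt)
        (fun v => (((y :: t).count v : Int) == m)) (fun v => ((t.count v : Int) == m))
        (fun v _ hv => by simp only [hcnt v hv])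
    rw [e1, e2]
    simp only [hcy, beq_iff_eq]
    push_cast
    split_ifs <;> omega
  · have hyd : y ∉ t.dedup := fun h => hyt (List.mem_dedup.1 h)
    have hmem : ∀ v, v ∈ (y :: t).dedup ↔ v ∈ y :: t.dedup := by
      intro v; simp [List.mem_dedup]
    have e1 : List.countP (fun v => (((y :: t).count v : Int) == m)) ((y :: t).dedup)
        = List.countP (fun v => (((y :: t).count v : Int) == m)) (y :: t.dedup) :=
      pvCountP_same _ _ (List.nodup_dedup _)
        (List.Nodup.cons hyd (List.nodup_dedup _)) hmem _
    have e2 : List.countP (fun v => (((y :: t).count v : Int) == m)) t.dedup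
        = List.countP (fun v => ((t.count v : Int) == m)) t.dedup :=
      List.countP_congr (fun v hv => by
        have : v ≠ y := fun hvy => hyd (hvy ▸ hv)
        simp only [hcnt v this])
    have hc0 : t.count y = 0 := List.count_eq_zero.2 hyt
    rw [e1, List.countP_cons, e2]
    simp only [hcy, hc0, beq_iff_eq]
    push_cast
    split_ifs <;> omega

theorem pvAtm_pos_iff (m : Int) (w : List Int) :
    0 < pvAtm m w ↔ ∃ v ∈ w, (w.count v : Int) = m := by
  unfold pvAtm
  rw [Int.natCast_pos, List.countP_pos_iff]
  constructor
  · rintro ⟨v, hv, hp⟩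
    exact ⟨v, List.mem_dedup.1 hv, by simpa using hp⟩
  · rintro ⟨v, hv, hp⟩
    exact ⟨v, List.mem_dedup.2 hv, by simpa using hp⟩

theorem pvA_values (d : PySem.Dict Int Int) (w : List Int) (h : pvInvA d w) :
    PySem.Dict.values d = d.keys.map (fun v => (w.count v : Int)) := by
  have hit := PySem.Dict.items_eq_map_keys d h.1 0
  show d.items.map (fun p => p.2) = _
  rw [hit, List.map_map]
  exact List.map_congr_left (fun v _ => h.2.1 v)

theorem pvMax_char (d : PySem.Dict Int Int) (w : List Int) (h : pvInvA d w) (hw : w ≠ []) :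
    ∃ mx, PySem.List.max? (PySem.Dict.values d) (fun v => v) = some mx ∧
      (∃ v ∈ w, (w.count v : Int) = mx) ∧ ∀ v ∈ w, (w.count v : Int) ≤ mx := by
  have hvals := pvA_values d w h
  obtain ⟨v0, hv0⟩ := List.exists_mem_of_ne_nil w hw
  have hv0k : v0 ∈ d.keys := (h.2.2 v0).2 hv0
  have hne : PySem.Dict.values d ≠ [] := by
    rw [hvals]
    intro he
    rw [List.map_eq_nil_iff.1 he] at hv0k
    exact (List.not_mem_nil).elim hv0k
  cases hmx : PySem.List.max? (PySem.Dict.values d) (fun v => v) with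
  | none => exact absurd ((PySem.List.max?_eq_none_iff _ _).1 hmx) hne
  | some mx =>
    refine ⟨mx, rfl, ?_, ?_⟩
    · have := PySem.List.max?_mem hmx
      rw [hvals] at this
      obtain ⟨u, hu, hu2⟩ := List.mem_map.1 this
      exact ⟨u, (h.2.2 u).1 hu, hu2⟩
    · intro v hv
      have hvk : v ∈ d.keys := (h.2.2 v).2 hv
      have hmem : (w.count v : Int) ∈ PySem.Dict.values d := by
        rw [hvals]; exact List.mem_map_of_mem hvk
      exact PySem.List.max?_isMax hmx _ hmem

theorem pvMax_nil (d : PySem.Dict Int Int) (h : pvInvA d []) :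
    PySem.List.max? (PySem.Dict.values d) (fun v => v) = none := by
  have hk : d.keys = [] := by
    apply List.eq_nil_iff_forall_not_mem.2
    intro v hv
    simpa using (h.2.2 v).1 hv
  have hi : d.items = [] := List.map_eq_nil_iff.1 hk
  show PySem.List.max? (d.items.map (fun p => p.2)) (fun v => v) = none
  rw [hi]
  exact (PySem.List.max?_eq_none_iff _ _).2 rfl

theorem pvInvA_add (d : PySem.Dict Int Int) (w : List Int) (x : Int) (h : pvInvA d w) :
    pvInvA (PySem.Dict.modify d x 0 (fun c => c + 1)) (w ++ [x]) := by
  refine ⟨?_, ?_, ?_⟩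
  · rw [PySem.Dict.keys_modify]
    exact PySem.Dict.nodup_keys_insert d x _ h.1
  · intro v
    rw [PySem.Dict.getD_modify, List.count_append, List.count_singleton']
    by_cases hv : v = x
    · subst hv; simp [h.2.1 v]
    · rw [if_neg hv, h.2.1 v, if_neg (fun hc : x = v => hv hc.symm), Nat.add_zero]
  · intro v
    have : v ∈ (PySem.Dict.modify d x 0 (fun c => c + 1)).keys ↔ v = x ∨ v ∈ d.keys := by
      rw [PySem.Dict.keys_modify]; exact PySem.Dict.mem_keys_insert (k' := v) d x _
    rw [this, h.2.2 v]
    simp [List.mem_append, or_comm]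

theorem pvFind?_filter (l : List (Int × Int)) (v k : Int) (h : v ≠ k) :
    List.find? (fun p => p.1 == v) (l.filter (fun p => !(p.1 == k))) =
      List.find? (fun p => p.1 == v) l := by
  induction l with
  | nil => rfl
  | cons a l ih =>
    by_cases ha : a.1 = k
    · rw [List.filter_cons, if_neg (by simp [ha]), List.find?_cons_of_neg (by simp [ha]; exact fun hc => h hc.symm), ih]
    · rw [List.filter_cons, if_pos (by simp [ha])]
      by_cases hv : a.1 = v
      · rw [List.find?_cons_of_pos (by simp [hv]), List.find?_cons_of_pos (by simp [hv])]
      · rw [List.find?_cons_of_neg (by simp [hv]), List.find?_cons_of_neg (by simp [hv]), ih]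

theorem pvGet?_erase_ne (d : PySem.Dict Int Int) (k v : Int) (h : v ≠ k) :
    PySem.Dict.get? (PySem.Dict.erase d k) v = PySem.Dict.get? d v := by
  show ((d.items.filter (fun p => !(p.1 == k))).find? (fun p => p.1 == v)).map _ =
    (d.items.find? (fun p => p.1 == v)).map _
  rw [pvFind?_filter d.items v k h]

theorem pvGet?_erase_self (d : PySem.Dict Int Int) (k : Int) :
    PySem.Dict.get? (PySem.Dict.erase d k) k = none := by
  show ((d.items.filter (fun p => !(p.1 == k))).find? (fun p => p.1 == k)).map _ = none
  rw [List.find?_eq_none.2]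
  · rfl
  · intro p hp
    have := (List.mem_filter.1 hp).2
    simp at this ⊢
    exact this

theorem pvKeys_erase (d : PySem.Dict Int Int) (k : Int) :
    (PySem.Dict.erase d k).keys = d.keys.filter (fun a => !(a == k)) := by
  show (d.items.filter (fun p => !(p.1 == k))).map (fun p => p.1) =
    (d.items.map (fun p => p.1)).filter (fun a => !(a == k))
  rw [List.filter_map]
  rfl

theorem pvInvA_remove (d : PySem.Dict Int Int) (y : Int) (t : List Int)
    (h : pvInvA d (y :: t)) :
    pvInvA (if PySem.Dict.getD (PySem.Dict.modify d y 0 (fun c => c - 1)) y 0 = 0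
            then PySem.Dict.erase (PySem.Dict.modify d y 0 (fun c => c - 1)) y
            else PySem.Dict.modify d y 0 (fun c => c - 1)) t := by
  set d1 := PySem.Dict.modify d y 0 (fun c => c - 1) with hd1
  have hnd1 : d1.keys.Nodup := by
    rw [hd1, PySem.Dict.keys_modify]
    exact PySem.Dict.nodup_keys_insert d y _ h.1
  have hget1 : ∀ v : Int, PySem.Dict.getD d1 v 0 = (t.count v : Int) := by
    intro v
    rw [hd1, PySem.Dict.getD_modify]
    by_cases hv : v = y
    · subst hv
      rw [if_pos rfl, h.2.1 v, List.count_cons_self]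
      push_cast; ring
    · rw [if_neg hv, h.2.1 v, List.count_cons, if_neg (by simp; exact fun hc => hv hc.symm), Nat.add_zero]
  have hmem1 : ∀ v : Int, v ∈ d1.keys ↔ v = y ∨ v ∈ t := by
    intro v
    rw [hd1, PySem.Dict.keys_modify, PySem.Dict.mem_keys_insert (k' := v) d y _, h.2.2 v]
    simp [List.mem_cons]
  by_cases hz : PySem.Dict.getD d1 y 0 = 0
  · rw [if_pos hz]
    have hyt : y ∉ t := by
      intro hyt
      rw [hget1 y] at hz
      have : 0 < t.count y := List.count_pos_iff.2 hyt
      omega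
    refine ⟨?_, ?_, ?_⟩
    · rw [pvKeys_erase]
      exact List.Nodup.filter _ hnd1
    · intro v
      by_cases hv : v = y
      · subst hv
        show PySem.Dict.getD _ v 0 = _
        unfold PySem.Dict.getD
        rw [pvGet?_erase_self]
        rw [List.count_eq_zero.2 hyt]
        rfl
      · show PySem.Dict.getD _ v 0 = _
        unfold PySem.Dict.getD
        rw [pvGet?_erase_ne d1 y v hv]
        exact hget1 v
    · intro v
      rw [pvKeys_erase, List.mem_filter]
      constructor
      · rintro ⟨hvk, hvny⟩
        rcases (hmem1 v).1 hvk with h1 | h1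
        · simp [h1] at hvny
        · exact h1
      · intro hv
        have hvy : v ≠ y := fun hc => hyt (hc ▸ hv)
        exact ⟨(hmem1 v).2 (Or.inr hv), by simp [hvy]⟩
  · rw [if_neg hz]
    have hyt : y ∈ t := by
      rw [hget1 y] at hz
      rcases Nat.eq_zero_or_pos (t.count y) with h0 | h0
      · rw [h0] at hz; simp at hz
      · exact List.count_pos_iff.1 h0
    refine ⟨hnd1, hget1, ?_⟩
    intro v
    rw [hmem1 v]
    constructor
    · rintro (h1 | h1)
      · exact h1 ▸ hyt
      · exact h1
    · exact Or.inr

theorem pvGetMid (pre : List Int) (y : Int) (rest : List Int) :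
    PySem.List.pyGetD (pre ++ y :: rest) (pre.length : Int) 0 = y := by
  rw [PySem.List.pyGetD_natCast, List.getD_eq_getElem?_getD,
    List.getElem?_append_right (Nat.le_refl _), Nat.sub_self]
  rfl

theorem pvAshrink_noop (ev : List Int) (m : Int) (fuel : Nat) (d : PySem.Dict Int Int)
    (l : Int) (w : List Int) (h : pvInvA d w) (hb : ∀ v : Int, (w.count v : Int) ≤ m) :
    pvAshrink ev m fuel d l = (d, l) := by
  cases fuel with
  | zero => rfl
  | succ fuel =>
    cases hw : w with
    | nil =>
      rw [hw] at h
      show (match PySem.List.max? d.values (fun v => v) with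
        | none => (d, l)
        | some mx => if m < mx then _ else (d, l)) = (d, l)
      rw [pvMax_nil d h]
    | cons y t =>
      obtain ⟨mx, hmx, ⟨v0, hv0, hv0c⟩, hub⟩ := pvMax_char d w h (by rw [hw]; simp)
      show (match PySem.List.max? d.values (fun v => v) with
        | none => (d, l)
        | some mx => if m < mx then _ else (d, l)) = (d, l)
      rw [hmx]
      have : ¬ m < mx := not_lt.2 (hv0c ▸ hb v0)
      simp [this]

theorem pvShrink_lockstep (m x : Int) (suf : List Int) (hm : 1 ≤ m) :
    ∀ (fuel : Nat) (w pre : List Int) (d cnt : PySem.Dict Int Int) (atm : Int),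
      w.length ≤ fuel →
      pvInvA d w → pvInvB cnt w → atm = pvAtm m w →
      (∀ v : Int, v ≠ x → (w.count v : Int) ≤ m) → (w.count x : Int) ≤ m + 1 →
      ∃ j : Nat,
        pvAshrink (pre ++ w ++ suf) m fuel d (pre.length : Int) =
          ((pvAshrink (pre ++ w ++ suf) m fuel d (pre.length : Int)).1,
            ((pre.length + j : Nat) : Int)) ∧
        pvBshrink (pre ++ w ++ suf) m x fuel cnt atm (pre.length : Int) =
          ((pvBshrink (pre ++ w ++ suf) m x fuel cnt atm (pre.length : Int)).1,
            pvAtm m (w.drop j), ((pre.length + j : Nat) : Int)) ∧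
        pvInvA (pvAshrink (pre ++ w ++ suf) m fuel d (pre.length : Int)).1 (w.drop j) ∧
        pvInvB (pvBshrink (pre ++ w ++ suf) m x fuel cnt atm (pre.length : Int)).1 (w.drop j) ∧
        (∀ v : Int, ((w.drop j).count v : Int) ≤ m) ∧
        (w ≠ [] → w.drop j ≠ []) := by
  intro fuel
  induction fuel with
  | zero =>
    intro w pre d cnt atm hlen hA hB hatm hbd hx
    have hw : w = [] := List.eq_nil_of_length_eq_zero (Nat.le_zero.mp hlen)
    subst hw
    refine ⟨0, by simp [pvAshrink], by simp [pvBshrink, hatm], by simpa using hA,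
      by simpa using hB, by intro v; simp; omega, fun h => absurd rfl h⟩
  | succ fuel ih =>
    intro w pre d cnt atm hlen hA hB hatm hbd hx
    by_cases hxm : (w.count x : Int) ≤ m
    · have hall : ∀ v : Int, (w.count v : Int) ≤ m := by
        intro v
        by_cases hvx : v = x
        · exact hvx ▸ hxm
        · exact hbd v hvx
      have hAeq : pvAshrink (pre ++ w ++ suf) m (fuel+1) d (pre.length : Int) =
          (d, (pre.length : Int)) := pvAshrink_noop _ m _ d _ w hA hall
      have hBeq : pvBshrink (pre ++ w ++ suf) m x (fuel+1) cnt atm (pre.length : Int) =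
          (cnt, atm, (pre.length : Int)) := by
        show (if m < PySem.Dict.getD cnt x 0 then _ else (cnt, atm, (pre.length : Int))) = _
        rw [hB x, if_neg (not_lt.2 hxm)]
      refine ⟨0, ?_, ?_, ?_, ?_, ?_, ?_⟩
      · rw [hAeq]; simp
      · rw [hBeq]; simp [hatm]
      · rw [hAeq]; simpa using hA
      · rw [hBeq]; simpa using hB
      · simpa using hall
      · simp
    · have hxc : (w.count x : Int) = m + 1 := le_antisymm hx (by omega)
      have hxpos : 0 < w.count x := by omega
      obtain ⟨y, t, hw⟩ : ∃ y t, w = y :: t := by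
        cases w with
        | nil => simp at hxpos
        | cons y t => exact ⟨y, t, rfl⟩
      subst hw
      have hxmem : x ∈ y :: t := List.count_pos_iff.1 hxpos
      obtain ⟨mx, hmx, _, hub⟩ := pvMax_char d (y :: t) hA (by simp)
      have hmlt : m < mx := lt_of_lt_of_le (by omega) (hxc ▸ hub x hxmem)
      have hev : pre ++ (y :: t) ++ suf = pre ++ y :: (t ++ suf) := by simp
      have hy : PySem.List.pyGetD (pre ++ (y :: t) ++ suf) (pre.length : Int) 0 = y := by
        rw [hev]; exact pvGetMid pre y (t ++ suf)
      -- one unfolding of A's while loop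
      have hAstep : pvAshrink (pre ++ (y :: t) ++ suf) m (fuel+1) d (pre.length : Int) =
          pvAshrink (pre ++ (y :: t) ++ suf) m fuel
            (if PySem.Dict.getD (PySem.Dict.modify d y 0 (fun c => c - 1)) y 0 = 0
             then PySem.Dict.erase (PySem.Dict.modify d y 0 (fun c => c - 1)) y
             else PySem.Dict.modify d y 0 (fun c => c - 1)) ((pre.length : Int) + 1) := by
        simp only [pvAshrink, hmx, hy, if_pos hmlt]
      -- one unfolding of B's while loop
      have hBx : PySem.Dict.getD cnt x 0 = m + 1 := by rw [hB x, hxc]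
      have hdv : PySem.Dict.getD cnt y 0 - 1 = (t.count y : Int) := by
        rw [hB y]; simp
      have hBstep : pvBshrink (pre ++ (y :: t) ++ suf) m x (fuel+1) cnt atm (pre.length : Int) =
          pvBshrink (pre ++ (y :: t) ++ suf) m x fuel
            (PySem.Dict.insert cnt y (PySem.Dict.getD cnt y 0 - 1))
            (if PySem.Dict.getD cnt y 0 - 1 = m then atm + 1
             else if PySem.Dict.getD cnt y 0 - 1 = m - 1 then atm - 1 else atm)
            ((pre.length : Int) + 1) := by
        simp only [pvBshrink, hBx, hy]
        rw [if_pos (show m < m + 1 by omega)]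
      -- invariants after removing y
      have hA' := pvInvA_remove d y t hA
      have hB' : pvInvB (PySem.Dict.insert cnt y (PySem.Dict.getD cnt y 0 - 1)) t := by
        intro v
        rw [PySem.Dict.getD_insert]
        by_cases hv : v = y
        · rw [if_pos hv, hv, hdv]
        · rw [if_neg hv, hB v, List.count_cons,
            if_neg (by simp; exact fun hc => hv hc.symm), Nat.add_zero]
      have hatm' : (if PySem.Dict.getD cnt y 0 - 1 = m then atm + 1
          else if PySem.Dict.getD cnt y 0 - 1 = m - 1 then atm - 1 else atm) = pvAtm m t := by
        rw [hdv, hatm, pvAtm_cons m (by omega) y t]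
        by_cases h1 : (t.count y : Int) = m
        · rw [if_pos h1, if_pos h1, if_neg (by omega)]; ring
        · rw [if_neg h1, if_neg h1]
          by_cases h2 : (t.count y : Int) = m - 1
          · rw [if_pos h2, if_pos (by omega)]; ring
          · rw [if_neg h2, if_neg (by omega)]; ring
      have hbd' : ∀ v : Int, v ≠ x → (t.count v : Int) ≤ m := by
        intro v hv
        have := hbd v hv
        have hle : t.count v ≤ (y :: t).count v := by
          rw [List.count_cons]; omega
        omega
      have hx' : (t.count x : Int) ≤ m + 1 := by
        have hle : t.count x ≤ (y :: t).count x := by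
          rw [List.count_cons]; omega
        omega
      have htne : t ≠ [] := by
        have h2 : (y :: t).count x ≤ (y :: t).length := List.count_le_length
        cases t with
        | nil => simp at h2; omega
        | cons a s => simp
      -- apply the induction hypothesis with pre extended by y
      have hevih : (pre ++ [y]) ++ t ++ suf = pre ++ (y :: t) ++ suf := by simp
      have hlenih : ((pre ++ [y]).length : Int) = (pre.length : Int) + 1 := by
        simp
      obtain ⟨j', ih1, ih2, ih3, ih4, ih5, ih6⟩ :=
        ih t (pre ++ [y]) _ _ _ (by simpa using Nat.lt_succ_iff.mp (by simpa using hlen))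
          hA' hB' hatm' hbd' hx'
      rw [hevih, hlenih] at ih1 ih2 ih3 ih4
      refine ⟨j' + 1, ?_, ?_, ?_, ?_, ?_, fun _ => ih6 htne⟩
      · rw [hAstep, ih1]
        congr 1
        simp only [List.length_append, List.length_cons, List.length_nil]
        push_cast
        ring
      · rw [hBstep, ih2]
        congr 1
        simp only [List.drop_succ_cons]
        congr 1
        simp only [List.length_append, List.length_cons, List.length_nil]
        push_cast
        ring
      · rw [hAstep]
        simpa using ih3
      · rw [hBstep]
        simpa using ih4
      · simpa using ih5

theorem pvFinal_check (d' : PySem.Dict Int Int) (w' : List Int) (m atm' best z : Int)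
    (hA' : pvInvA d' w') (hw' : w' ≠ []) (hbd : ∀ v : Int, (w'.count v : Int) ≤ m)
    (hatm' : atm' = pvAtm m w') :
    (match PySem.List.max? (PySem.Dict.values d') (fun v => v) with
      | none => best
      | some mx => if mx = m then max best z else best)
    = (if 0 < atm' ∧ best < z then z else best) := by
  obtain ⟨mx, hmx, ⟨v0, hv0, hv0c⟩, hub⟩ := pvMax_char d' w' hA' hw'
  rw [hmx]
  show (if mx = m then max best z else best) = _
  have hiff : mx = m ↔ (0 < atm') := by
    rw [hatm', pvAtm_pos_iff]
    constructor
    · intro he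
      exact ⟨v0, hv0, by rw [hv0c, he]⟩
    · rintro ⟨v, hv, hc⟩
      have h1 : m ≤ mx := hc ▸ hub v hv
      have h2 : mx ≤ m := hv0c ▸ hbd v0
      omega
  by_cases hmm : mx = m
  · rw [if_pos hmm]
    have hpos : 0 < atm' := hiff.1 hmm
    by_cases hz : best < z
    · rw [if_pos ⟨hpos, hz⟩, max_eq_right (le_of_lt hz)]
    · rw [if_neg (fun hc => hz hc.2), max_eq_left (not_lt.1 hz)]
  · rw [if_neg hmm, if_neg (fun hc => hmm (hiff.2 hc.1))]

theorem pvStep (ev : List Int) (m : Int) (hm : 1 ≤ m) (k : Nat) (hk : k < ev.length)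
    (x : Int) (hx : ev[k]? = some x)
    (sA : PySem.Dict Int Int × Int × Int) (sB : PySem.Dict Int Int × Int × Int × Int)
    (hrel : pvRel ev m k sA sB) :
    pvRel ev m (k + 1) (pvAstep ev m ev.length sA (k : Int))
      (pvBstep ev m ev.length sB ((k : Int), x)) := by
  obtain ⟨d, lA, bA⟩ := sA
  obtain ⟨cnt, atm, lB, bB⟩ := sB
  obtain ⟨l, hl, hlA, hlB, hbest, hInvA, hInvB, hatm, hbd⟩ := hrel
  simp only at hlA hlB hbest hInvA hInvB hatm hbd
  subst hlA hlB
  -- the window gains x on the right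
  have hxev : PySem.List.pyGetD ev (k : Int) 0 = x := by
    rw [PySem.List.pyGetD_natCast, List.getD_eq_getElem?_getD, hx]
    rfl
  have htk : ev.take (k+1) = ev.take k ++ [x] := by
    rw [List.take_add_one, hx]
    rfl
  have hlenk : (ev.take k).length = k := by
    rw [List.length_take]
    omega
  have hw1 : (ev.take (k+1)).drop l = ((ev.take k).drop l) ++ [x] := by
    rw [htk, List.drop_append, hlenk, Nat.sub_eq_zero_of_le hl]
    rfl
  set w := (ev.take k).drop l with hwdef
  have hwlen : w.length = k - l := by rw [hwdef, List.length_drop, hlenk]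
  have hInvA1 : pvInvA (PySem.Dict.modify d x 0 (fun c => c + 1)) (w ++ [x]) :=
    pvInvA_add d w x hInvA
  have hcx1 : ((w ++ [x]).count x : Int) = (w.count x : Int) + 1 := by
    simp [List.count_append]
  have hcne : ∀ v : Int, v ≠ x → ((w ++ [x]).count v : Int) = (w.count v : Int) := by
    intro v hv
    rw [List.count_append, List.count_singleton', if_neg (fun hc : x = v => hv hc.symm), Nat.add_zero]
  have hgc : PySem.Dict.getD cnt x 0 + 1 = (w.count x : Int) + 1 := by rw [hInvB x]
  have hInvB1 : pvInvB (PySem.Dict.insert cnt x (PySem.Dict.getD cnt x 0 + 1)) (w ++ [x]) := by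
    intro v
    rw [PySem.Dict.getD_insert]
    by_cases hv : v = x
    · rw [if_pos hv, hgc, hv, hcx1]
    · rw [if_neg hv, hInvB v, hcne v hv]
  have hw1ne : w ++ [x] ≠ [] := by simp
  -- B's branch discriminant
  by_cases hcm : m < (w.count x : Int) + 1
  · -- x's count reaches m + 1: both sides shrink in lockstep
    have hcxm : (w.count x : Int) = m := by
      have := hbd x
      omega
    -- decompose ev around the new window
    have hsplit : ev.take l ++ (w ++ [x]) ++ ev.drop (k+1) = ev := by
      rw [hwdef]
      have h1 : ev.take l ++ ((ev.take k).drop l ++ [x]) = ev.take (k+1) := by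
        rw [htk, ← List.append_assoc]
        congr 1
        have : ev.take l = (ev.take k).take l := by
          rw [List.take_take, Nat.min_eq_left hl]
        rw [this, List.take_append_drop]
      calc ev.take l ++ ((ev.take k).drop l ++ [x]) ++ ev.drop (k+1)
          = (ev.take l ++ ((ev.take k).drop l ++ [x])) ++ ev.drop (k+1) := by
            rw [List.append_assoc]
        _ = ev.take (k+1) ++ ev.drop (k+1) := by rw [h1]
        _ = ev := List.take_append_drop _ _
    have hprelen : (ev.take l).length = l := by
      rw [List.length_take]
      omega
    have hfuel : (w ++ [x]).length ≤ ev.length + 1 := by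
      rw [List.length_append, hwlen]
      simp
      omega
    have hatm1 : atm - 1 = pvAtm m (w ++ [x]) := by
      rw [hatm, pvAtm_append m (by omega) w x, if_neg (by omega), if_pos hcxm]
      ring
    have hbd1 : ∀ v : Int, v ≠ x → (((w ++ [x]).count v : Int)) ≤ m := by
      intro v hv
      rw [hcne v hv]
      exact hbd v
    have hx1 : (((w ++ [x]).count x : Int)) ≤ m + 1 := by rw [hcx1]; omega
    obtain ⟨j, lk1, lk2, lk3, lk4, lk5, lk6⟩ :=
      pvShrink_lockstep m x (ev.drop (k+1)) hm (ev.length + 1) (w ++ [x]) (ev.take l)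
        (PySem.Dict.modify d x 0 (fun c => c + 1))
        (PySem.Dict.insert cnt x (PySem.Dict.getD cnt x 0 + 1)) (atm - 1)
        hfuel hInvA1 hInvB1 hatm1 hbd1 hx1
    rw [hsplit, hprelen] at lk1 lk2 lk3 lk4
    have hjlt : l + j < k + 1 := by
      have hne := lk6 hw1ne
      have : j < (w ++ [x]).length := by
        by_contra hge
        rw [List.drop_eq_nil_of_le (not_lt.1 hge)] at hne
        exact hne rfl
      rw [List.length_append, hwlen] at this
      simp at this
      omega
    -- assemble the new relation
    refine ⟨l + j, by omega, ?_, ?_, ?_, ?_, ?_, ?_, ?_⟩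
    · show (pvAstep ev m ev.length (d, (l : Int), bA) (k : Int)).2.1 = _
      simp only [pvAstep, hxev]
      rw [lk1]
    · show (pvBstep ev m ev.length (cnt, atm, (l : Int), bB) ((k : Int), x)).2.2.1 = _
      simp only [pvBstep]
      rw [if_neg (by omega), if_pos (by omega), lk2]
    · -- equal best values
      show (pvAstep ev m ev.length (d, (l : Int), bA) (k : Int)).2.2 =
        (pvBstep ev m ev.length (cnt, atm, (l : Int), bB) ((k : Int), x)).2.2.2
      simp only [pvAstep, pvBstep, hxev]
      rw [if_neg (by omega : ¬ PySem.Dict.getD cnt x 0 + 1 = m),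
        if_pos (by omega : m < PySem.Dict.getD cnt x 0 + 1)]
      rw [lk1, lk2, hbest]
      exact pvFinal_check _ _ m _ bB _ lk3 (lk6 hw1ne) lk5 rfl
    · show pvInvA (pvAstep ev m ev.length (d, (l : Int), bA) (k : Int)).1 _
      simp only [pvAstep, hxev]
      have hdij : (ev.take (k+1)).drop (l + j) = ((w ++ [x]).drop j) := by
        rw [← hw1, List.drop_drop, Nat.add_comm]
      rw [hdij]
      exact lk3
    · show pvInvB (pvBstep ev m ev.length (cnt, atm, (l : Int), bB) ((k : Int), x)).1 _
      simp only [pvBstep]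
      rw [if_neg (by omega : ¬ PySem.Dict.getD cnt x 0 + 1 = m),
        if_pos (by omega : m < PySem.Dict.getD cnt x 0 + 1)]
      have hdij : (ev.take (k+1)).drop (l + j) = ((w ++ [x]).drop j) := by
        rw [← hw1, List.drop_drop, Nat.add_comm]
      rw [hdij]
      exact lk4
    · show (pvBstep ev m ev.length (cnt, atm, (l : Int), bB) ((k : Int), x)).2.1 = _
      simp only [pvBstep]
      rw [if_neg (by omega : ¬ PySem.Dict.getD cnt x 0 + 1 = m),
        if_pos (by omega : m < PySem.Dict.getD cnt x 0 + 1)]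
      have hdij : (ev.take (k+1)).drop (l + j) = ((w ++ [x]).drop j) := by
        rw [← hw1, List.drop_drop, Nat.add_comm]
      rw [hdij, lk2]
    · intro v
      have hdij : (ev.take (k+1)).drop (l + j) = ((w ++ [x]).drop j) := by
        rw [← hw1, List.drop_drop, Nat.add_comm]
      rw [hdij]
      exact lk5 v
  · -- x's count stays ≤ m: A's while loop does not run, B does not shrink
    have hall1 : ∀ v : Int, ((w ++ [x]).count v : Int) ≤ m := by
      intro v
      by_cases hv : v = x
      · rw [hv, hcx1]; omega
      · rw [hcne v hv]; exact hbd v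
    have hAnoop : pvAshrink ev m (ev.length + 1)
        (PySem.Dict.modify d x 0 (fun c => c + 1)) (l : Int) =
        (PySem.Dict.modify d x 0 (fun c => c + 1), (l : Int)) :=
      pvAshrink_noop ev m _ _ _ (w ++ [x]) hInvA1 hall1
    have hatm1 : (if PySem.Dict.getD cnt x 0 + 1 = m then atm + 1 else atm) =
        pvAtm m (w ++ [x]) := by
      rw [hgc, hatm, pvAtm_append m (by omega) w x]
      by_cases h1 : (w.count x : Int) + 1 = m
      · rw [if_pos h1, if_pos h1, if_neg (by omega)]
        ring
      · rw [if_neg h1, if_neg h1, if_neg (by omega)]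
        ring
    have hBq : (if PySem.Dict.getD cnt x 0 + 1 = m
          then (PySem.Dict.insert cnt x (PySem.Dict.getD cnt x 0 + 1), atm + 1, (l : Int))
          else if m < PySem.Dict.getD cnt x 0 + 1
          then pvBshrink ev m x (ev.length + 1)
            (PySem.Dict.insert cnt x (PySem.Dict.getD cnt x 0 + 1)) (atm - 1) (l : Int)
          else (PySem.Dict.insert cnt x (PySem.Dict.getD cnt x 0 + 1), atm, (l : Int))) =
        (PySem.Dict.insert cnt x (PySem.Dict.getD cnt x 0 + 1),
          (if PySem.Dict.getD cnt x 0 + 1 = m then atm + 1 else atm), (l : Int)) := by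
      by_cases h1 : PySem.Dict.getD cnt x 0 + 1 = m
      · rw [if_pos h1, if_pos h1]
      · rw [if_neg h1, if_neg h1, if_neg (by rw [hgc]; omega)]
    refine ⟨l, by omega, ?_, ?_, ?_, ?_, ?_, ?_, ?_⟩
    · show (pvAstep ev m ev.length (d, (l : Int), bA) (k : Int)).2.1 = _
      simp only [pvAstep, hxev]
      rw [hAnoop]
    · show (pvBstep ev m ev.length (cnt, atm, (l : Int), bB) ((k : Int), x)).2.2.1 = _
      simp only [pvBstep]
      rw [hBq]
    · show (pvAstep ev m ev.length (d, (l : Int), bA) (k : Int)).2.2 =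
        (pvBstep ev m ev.length (cnt, atm, (l : Int), bB) ((k : Int), x)).2.2.2
      simp only [pvAstep, pvBstep, hxev]
      rw [hBq, hAnoop, hbest]
      exact pvFinal_check _ _ m _ bB _ hInvA1 hw1ne hall1 hatm1
    · show pvInvA (pvAstep ev m ev.length (d, (l : Int), bA) (k : Int)).1 _
      simp only [pvAstep, hxev]
      rw [hAnoop, hw1]
      exact hInvA1
    · show pvInvB (pvBstep ev m ev.length (cnt, atm, (l : Int), bB) ((k : Int), x)).1 _
      simp only [pvBstep]
      rw [hBq, hw1]
      exact hInvB1
    · show (pvBstep ev m ev.length (cnt, atm, (l : Int), bB) ((k : Int), x)).2.1 = _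
      simp only [pvBstep]
      rw [hBq, hw1]
      exact hatm1
    · intro v
      rw [hw1]
      exact hall1 v

theorem pvOuter (ev : List Int) (m : Int) (hm : 1 ≤ m) :
    ∀ k : Nat, k ≤ ev.length →
      pvRel ev m k
        (((List.range k).map (fun i : Nat => (i : Int))).foldl (pvAstep ev m ev.length)
          (PySem.Dict.empty, 0, 0))
        (((PySem.List.enumerate ev).take k).foldl (pvBstep ev m ev.length)
          (PySem.Dict.empty, 0, 0, 0)) := by
  intro k
  induction k with
  | zero =>
    intro _
    exact ⟨0, Nat.le_refl 0, rfl, rfl, rfl,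
      ⟨by simp [PySem.Dict.keys_empty], fun v => by simp [PySem.Dict.getD_empty],
        fun v => by simp [PySem.Dict.keys_empty]⟩,
      fun v => by simp [PySem.Dict.getD_empty],
      by simp [pvAtm],
      fun v => by simp; omega⟩
  | succ k ihk =>
    intro hk1
    have hk : k < ev.length := hk1
    have ih := ihk (Nat.le_of_lt hk)
    have hx : ev[k]? = some ev[k] := List.getElem?_eq_getElem hk
    have hfa : (List.range (k+1)).map (fun i : Nat => (i : Int)) =
        (List.range k).map (fun i : Nat => (i : Int)) ++ [(k : Int)] := by
      rw [List.range_succ, List.map_append]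
      rfl
    have hfb : (PySem.List.enumerate ev).take (k+1) =
        (PySem.List.enumerate ev).take k ++ [((k : Int), ev[k])] := by
      rw [List.take_add_one, PySem.List.getElem?_enumerate, hx]
      simp
    rw [hfa, hfb, List.foldl_append, List.foldl_append]
    simp only [List.foldl_cons, List.foldl_nil]
    exact pvStep ev m hm k hk ev[k] hx _ _ ih

-- ===== VERDICT (by name: the statement is the Claim_ definition above) =====
theorem findConsistentLogs_spec : Claim_equal_findConsistentLogs := by
  unfold Claim_equal_findConsistentLogs Spec_findConsistentLogs Pre_findConsistentLogs
  intro ev _ hpre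
  have hvals : (PySem.Dict.counter ev).values =
      (PySem.Set.ofList ev).map (fun u => ((ev.count u : Nat) : Int)) := by
    show (PySem.Dict.counter ev).items.map (fun p => p.2) = _
    rw [PySem.Dict.items_counter, List.map_map]
    rfl
  have hvane : (PySem.Dict.counter ev).values ≠ [] := by
    obtain ⟨z, t, rfl⟩ : ∃ z t, ev = z :: t := by
      cases ev with
      | nil => exact absurd rfl hpre
      | cons z t => exact ⟨z, t, rfl⟩
    rw [hvals]
    intro he
    have hz : z ∈ PySem.Set.ofList (z :: t) := (PySem.Set.mem_ofList _ _).2 (List.mem_cons_self)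
    have := List.mem_map_of_mem (f := fun u => (((z :: t).count u : Nat) : Int)) hz
    rw [he] at this
    exact List.not_mem_nil this
  cases hmin : PySem.List.min? (PySem.Dict.counter ev).values (fun v => v) with
  | none => exact absurd ((PySem.List.min?_eq_none_iff _ _).1 hmin) hvane
  | some m =>
    have hmem := PySem.List.min?_mem hmin
    have h1m : 1 ≤ m := by
      rw [hvals] at hmem
      obtain ⟨u, hu, hval⟩ := List.mem_map.1 hmem
      have huev : u ∈ ev := (PySem.Set.mem_ofList _ _).1 hu
      have : 0 < ev.count u := List.count_pos_iff.2 huev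
      omega
    obtain ⟨l, _, _, _, hbest, _⟩ := pvOuter ev m h1m ev.length (Nat.le_refl _)
    simp only [findConsistentLogs, findConsistentLogs_alt, hmin]
    rw [PySem.List.pyRange_zero_natCast]
    have hteq : (PySem.List.enumerate ev).take ((PySem.List.enumerate ev).length) =
        PySem.List.enumerate ev := List.take_length
    rw [PySem.List.length_enumerate] at hteq
    rw [hteq] at hbest
    exact hbest
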